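-- pv_equiv track=rewrite | github.com/enneket/wiki-compiler | scripts/wiki_dreamer.py | find_ghost_concepts
-- ===== SOURCE A (Python) =====
-- from collections import Counter
--
-- def find_ghost_concepts(nodes):
--     """找出被引用但完全没有对应文章的"幽灵概念"。"""
--     all_targets = set()
--     for info in nodes.values():
--         for t in info["out_links"]:
--             all_targets.add(t)
--     ghosts = all_targets - set(nodes.keys())
--     # 统计每个幽灵被引用的次数
--     ghost_counts = Counter()
--     for info in nodes.values():
--         for t in info["out_links"]:
--             if t in ghosts:
--                 ghost_counts[t] += 1
--     return ghost_counts
-- ===== SOURCE B (Python) =====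
-- from collections import Counter
--
-- def find_ghost_concepts(nodes):
--     """Tally every link target once, then prune the targets that have articles."""
--     counts = Counter()
--     for info in nodes.values():
--         counts.update(info["out_links"])
--     for k in nodes:
--         counts.pop(k, None)
--     return counts
-- ===== Notes on version B (the rewrite author's own statement) =====
-- stated objective: simpler
-- what changed: Replaces A's two full scans (one to build the ghost set, one to re-scan all links with a per-element membership test) by a single count-everything pass followed by pruning the existing node keys from the Counter.
import Mathlib
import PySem

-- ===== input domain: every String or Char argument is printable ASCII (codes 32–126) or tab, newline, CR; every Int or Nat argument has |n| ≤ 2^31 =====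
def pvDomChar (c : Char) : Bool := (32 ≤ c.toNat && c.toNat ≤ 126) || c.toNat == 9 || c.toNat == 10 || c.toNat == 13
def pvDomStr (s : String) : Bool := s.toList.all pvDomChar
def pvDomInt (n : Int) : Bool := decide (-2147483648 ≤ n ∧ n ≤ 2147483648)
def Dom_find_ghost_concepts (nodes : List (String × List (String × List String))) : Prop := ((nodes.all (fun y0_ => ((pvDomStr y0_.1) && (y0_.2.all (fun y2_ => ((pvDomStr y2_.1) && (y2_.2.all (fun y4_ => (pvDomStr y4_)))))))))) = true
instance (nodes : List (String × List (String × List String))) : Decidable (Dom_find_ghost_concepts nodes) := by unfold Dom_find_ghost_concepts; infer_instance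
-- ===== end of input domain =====

-- B replaces A's two scans (ghost set, then a filtered recount) by one count-everything
-- pass followed by pruning the node keys from the Counter; objective: simpler.

-- ===== PORT A =====
-- info["out_links"] is a dict lookup that raises KeyError when the key is absent;
-- Pre_ admits exactly the inputs where it is present, so the getD default is never used.
def find_ghost_concepts (nodes : List (String × List (String × List String))) : List (String × Int) :=
  let all_targets : PySem.Set String :=
    nodes.foldl (fun s p =>
      ((PySem.Dict.mk p.2).getD "out_links" []).foldl (fun s t => PySem.Set.add s t) s)
      PySem.Set.empty
  let ghosts : PySem.Set String :=
    PySem.Set.diff all_targets (PySem.Set.ofList (nodes.map (fun p => p.1)))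
  let ghost_counts : PySem.Dict String Int :=
    nodes.foldl (fun d p =>
      ((PySem.Dict.mk p.2).getD "out_links" []).foldl
        (fun d t => if PySem.Set.contains ghosts t then d.modify t 0 (· + 1) else d) d)
      PySem.Dict.empty
  ghost_counts.items

-- ===== PORT B =====
def find_ghost_concepts_alt (nodes : List (String × List (String × List String))) : List (String × Int) :=
  let counts : PySem.Dict String Int :=
    nodes.foldl (fun d p =>
      ((PySem.Dict.mk p.2).getD "out_links" []).foldl (fun d t => d.modify t 0 (· + 1)) d)
      PySem.Dict.empty
  (nodes.foldl (fun d p => d.erase p.1) counts).items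

-- ===== PRECONDITION & SPEC =====
-- Pre_ excludes exactly the inputs on which A raises KeyError: some node info dict
-- lacks the "out_links" key.
def Pre_find_ghost_concepts (nodes : List (String × List (String × List String))) : Prop :=
  ∀ p ∈ nodes, "out_links" ∈ p.2.map Prod.fst
instance (nodes : List (String × List (String × List String))) : Decidable (Pre_find_ghost_concepts nodes) := by unfold Pre_find_ghost_concepts; infer_instance

def pvWitness_find_ghost_concepts : (List (String × List (String × List String))) :=
  [("a", [("out_links", ["b", "a"])]), ("c", [("out_links", ["b"])])]

def Spec_find_ghost_concepts (nodes : List (String × List (String × List String))) (out : List (String × Int)) : Prop := out = find_ghost_concepts_alt nodes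
instance (nodes : List (String × List (String × List String))) (out : List (String × Int)) : Decidable (Spec_find_ghost_concepts nodes out) := by unfold Spec_find_ghost_concepts; infer_instance

-- ===== CLAIM (what is proved, stated in full; the proofs are below) =====
def Claim_equal_find_ghost_concepts : Prop := ∀ (nodes : List (String × List (String × List String))), Dom_find_ghost_concepts nodes → Pre_find_ghost_concepts nodes → Spec_find_ghost_concepts nodes (find_ghost_concepts nodes)

-- ===== LEMMAS AND PROOFS =====

-- a nested 'for info …: for t in links:' loop is one fold over the concatenation
theorem pvFoldlFlatMap {α β γ : Type} (g : α → List β) (f : γ → β → γ) :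
    ∀ (l : List α) (init : γ),
      l.foldl (fun acc x => (g x).foldl f acc) init = (l.flatMap g).foldl f init := by
  intro l
  induction l with
  | nil => intro init; rfl
  | cons a l ih => intro init; simp [List.flatMap_cons, List.foldl_append, ih]


theorem pvL1 {ν : Type} (k : String) (v : ν) :
    ∀ (l : List (String × ν)),
      List.filter (fun p => !p.1 == k) (List.map (fun p => if (p.1 == k) = true then (k, v) else p) l)
        = List.filter (fun p => !p.1 == k) l := by
  intro l
  induction l with
  | nil => rfl
  | cons p l ih =>
    by_cases hp : p.1 = k
    · simpa [hp] using ih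
    · simpa [hp] using ih

theorem pvL2 {ν : Type} (k k' : String) (h : k ≠ k') (v : ν) :
    ∀ (l : List (String × ν)),
      List.filter (fun p => !p.1 == k') (List.map (fun p => if (p.1 == k) = true then (k, v) else p) l)
        = List.map (fun p => if (p.1 == k) = true then (k, v) else p) (List.filter (fun p => !p.1 == k') l) := by
  intro l
  induction l with
  | nil => rfl
  | cons p l ih =>
    have hkk : ¬ k = k' := h
    have hkk' : ¬ k' = k := fun e => h e.symm
    by_cases hp : p.1 = k
    · have hp' : p.1 ≠ k' := by rw [hp]; exact h
      have h' : k' ≠ k := fun e => h e.symm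
      simpa [hp, hp', hkk, hkk'] using ih
    · by_cases hq : p.1 = k'
      · simpa [hp, hq, hkk, hkk'] using ih
      · simpa [hp, hq, hkk, hkk'] using ih

theorem pvL3 {ν : Type} (k k' : String) (h : k ≠ k') :
    ∀ (l : List (String × ν)),
      List.find? (fun p => p.1 == k) (List.filter (fun p => !p.1 == k') l)
        = List.find? (fun p => p.1 == k) l := by
  intro l
  induction l with
  | nil => rfl
  | cons p l ih =>
    have hkk : ¬ k = k' := h
    have hkk' : ¬ k' = k := fun e => h e.symm
    by_cases hq : p.1 = k'
    · have : p.1 ≠ k := by rw [hq]; exact fun e => h e.symm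
      simpa [hq, this, hkk, hkk'] using ih
    · by_cases hk : p.1 = k
      · simp [hk, hkk]
      · simpa [List.find?_cons, hq, hk] using ih

theorem pvL4 {ν : Type} (k k' : String) (h : k ≠ k') :
    ∀ (l : List (String × ν)),
      List.any (List.filter (fun p => !p.1 == k') l) (fun p => p.1 == k)
        = List.any l (fun p => p.1 == k) := by
  intro l
  induction l with
  | nil => rfl
  | cons p l ih =>
    have hkk : ¬ k = k' := h
    have hkk' : ¬ k' = k := fun e => h e.symm
    by_cases hq : p.1 = k'
    · have : p.1 ≠ k := by rw [hq]; exact fun e => h e.symm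
      have hb : (k' == k) = false := by simpa using hkk'
      simpa [hq, this, hb] using ih
    · rw [show List.filter (fun p => !p.1 == k') (p :: l) = p :: List.filter (fun p => !p.1 == k') l
            from by simp [hq], List.any_cons, List.any_cons, ih]

theorem pvEraseInsertSelf {ν : Type} (d : PySem.Dict String ν) (k : String) (v : ν) :
    (d.insert k v).erase k = d.erase k := by
  obtain ⟨l⟩ := d
  by_cases hc : (PySem.Dict.mk l).contains k = true
  · simp only [PySem.Dict.insert, hc, if_pos, PySem.Dict.erase]
    exact congrArg PySem.Dict.mk (pvL1 k v l)
  · simp [PySem.Dict.insert, hc, PySem.Dict.erase, List.filter_append]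

theorem pvGetDEraseNe {ν : Type} (d : PySem.Dict String ν) (k k' : String) (h : k ≠ k') (d0 : ν) :
    (d.erase k').getD k d0 = d.getD k d0 := by
  obtain ⟨l⟩ := d
  simp only [PySem.Dict.getD, PySem.Dict.get?, PySem.Dict.erase]
  rw [pvL3 k k' h l]

theorem pvContainsEraseNe {ν : Type} (d : PySem.Dict String ν) (k k' : String) (h : k ≠ k') :
    (d.erase k').contains k = d.contains k := by
  obtain ⟨l⟩ := d
  simp only [PySem.Dict.contains, PySem.Dict.erase]
  exact pvL4 k k' h l

theorem pvEraseInsertNe {ν : Type} (d : PySem.Dict String ν) (k k' : String) (h : k ≠ k') (v : ν) :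
    (d.insert k v).erase k' = (d.erase k').insert k v := by
  obtain ⟨l⟩ := d
  have hc' : ((PySem.Dict.mk l).erase k').contains k = (PySem.Dict.mk l).contains k :=
    pvContainsEraseNe _ _ _ h
  simp only [PySem.Dict.erase] at hc'
  by_cases hc : (PySem.Dict.mk l).contains k = true
  · rw [hc] at hc'
    simp only [PySem.Dict.insert, PySem.Dict.erase, hc, hc', if_pos]
    exact congrArg PySem.Dict.mk (pvL2 k k' h v l)
  · rw [eq_false_of_ne_true hc] at hc'
    simp only [PySem.Dict.insert, hc, hc', PySem.Dict.erase, Bool.false_eq_true, if_false]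
    refine congrArg PySem.Dict.mk ?_
    rw [List.filter_append]
    simp [h]

theorem pvEraseModifyNe {ν : Type} (d : PySem.Dict String ν) (k k' : String) (h : k ≠ k')
    (d0 : ν) (f : ν → ν) :
    (d.modify k d0 f).erase k' = (d.erase k').modify k d0 f := by
  simp only [PySem.Dict.modify]
  rw [pvEraseInsertNe _ _ _ h, pvGetDEraseNe _ _ _ h]

-- the pruning loop of B
def pvEraseAll (K : List String) (d : PySem.Dict String Int) : PySem.Dict String Int :=
  K.foldl (fun d k => d.erase k) d

theorem pvEraseAllModify (K : List String) :
    ∀ (d : PySem.Dict String Int) (t : String) (d0 : Int) (f : Int → Int),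
      pvEraseAll K (d.modify t d0 f)
        = if t ∈ K then pvEraseAll K d else (pvEraseAll K d).modify t d0 f := by
  induction K with
  | nil => intro d t d0 f; simp [pvEraseAll]
  | cons k K ih =>
    intro d t d0 f
    by_cases ht : t = k
    · subst ht
      have he : (d.modify t d0 f).erase t = d.erase t := by
        simp only [PySem.Dict.modify]; exact pvEraseInsertSelf _ _ _
      simp [pvEraseAll, List.foldl_cons, he]
    · have : (d.modify t d0 f).erase k = (d.erase k).modify t d0 f :=
        pvEraseModifyNe _ _ _ ht _ _
      simp only [pvEraseAll, List.foldl_cons, this]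
      rw [show (K.foldl (fun d k => d.erase k) ((d.erase k).modify t d0 f))
            = pvEraseAll K ((d.erase k).modify t d0 f) from rfl, ih]
      simp [pvEraseAll, List.mem_cons, ht]

theorem pvEraseAllCounter (K : List String) :
    ∀ (ts : List String) (d : PySem.Dict String Int),
      pvEraseAll K (ts.foldl (fun d t => d.modify t 0 (· + 1)) d)
        = ts.foldl (fun d t => if t ∈ K then d else d.modify t 0 (· + 1)) (pvEraseAll K d) := by
  intro ts
  induction ts with
  | nil => intro d; rfl
  | cons t ts ih =>
    intro d
    simp only [List.foldl_cons, ih, pvEraseAllModify]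

theorem pvEraseAllEmpty (K : List String) : pvEraseAll K PySem.Dict.empty = PySem.Dict.empty := by
  induction K with
  | nil => rfl
  | cons k K ih =>
    have he : (PySem.Dict.empty : PySem.Dict String Int).erase k = PySem.Dict.empty := rfl
    simpa [pvEraseAll, List.foldl_cons, he] using ih

-- A's membership test in the counting loop: for t drawn from ts, t is a ghost iff t is no node key
theorem pvGhostContains (ts K : List String) (t : String) (ht : t ∈ ts) :
    PySem.Set.contains (PySem.Set.diff (PySem.Set.ofList ts) (PySem.Set.ofList K)) t
      = !decide (t ∈ K) := by
  simp only [PySem.Set.contains, PySem.Set.diff]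
  by_cases hk : t ∈ K
  · simp [PySem.Set.mem_ofList, hk]
  · simp [PySem.Set.mem_ofList, hk, ht]

theorem pvAUnfold (nodes : List (String × List (String × List String))) :
    find_ghost_concepts nodes
      = (nodes.foldl (fun d p =>
          ((PySem.Dict.mk p.2).getD "out_links" []).foldl
            (fun d t => if PySem.Set.contains
                (PySem.Set.diff
                  (nodes.foldl (fun s p =>
                    ((PySem.Dict.mk p.2).getD "out_links" []).foldl (fun s t => PySem.Set.add s t) s)
                    PySem.Set.empty)
                  (PySem.Set.ofList (nodes.map (fun p => p.1)))) t
              then d.modify t 0 (· + 1) else d) d)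
          PySem.Dict.empty).items := rfl

theorem pvBUnfold (nodes : List (String × List (String × List String))) :
    find_ghost_concepts_alt nodes
      = (nodes.foldl (fun d p => d.erase p.1)
          (nodes.foldl (fun d p =>
            ((PySem.Dict.mk p.2).getD "out_links" []).foldl (fun d t => d.modify t 0 (· + 1)) d)
            PySem.Dict.empty)).items := rfl

-- ===== VERDICT (by name: the statement is the Claim_ definition above) =====
theorem find_ghost_concepts_spec : Claim_equal_find_ghost_concepts := by
  intro nodes _ _
  unfold Spec_find_ghost_concepts
  rw [pvAUnfold, pvBUnfold]
  rw [pvFoldlFlatMap (g := fun p : String × List (String × List String) => (PySem.Dict.mk p.2).getD "out_links" [])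
        (f := fun (s : PySem.Set String) t => PySem.Set.add s t),
      pvFoldlFlatMap (g := fun p : String × List (String × List String) => (PySem.Dict.mk p.2).getD "out_links" [])
        (f := fun (d : PySem.Dict String Int) t => d.modify t 0 (· + 1)) nodes PySem.Dict.empty]
  rw [show (nodes.foldl (fun (d : PySem.Dict String Int) p => d.erase p.1)
        ((nodes.flatMap fun p : String × List (String × List String) => (PySem.Dict.mk p.2).getD "out_links" []).foldl
          (fun d t => d.modify t 0 (· + 1)) PySem.Dict.empty))
      = pvEraseAll (nodes.map (fun p => p.1))
        ((nodes.flatMap fun p : String × List (String × List String) => (PySem.Dict.mk p.2).getD "out_links" []).foldl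
          (fun d t => d.modify t 0 (· + 1)) PySem.Dict.empty) from by
    simp [pvEraseAll, List.foldl_map]]
  rw [pvEraseAllCounter, pvEraseAllEmpty]
  have hofl : ((nodes.flatMap fun p : String × List (String × List String) => (PySem.Dict.mk p.2).getD "out_links" []).foldl
      (fun s t => PySem.Set.add s t) PySem.Set.empty)
      = PySem.Set.ofList (nodes.flatMap fun p : String × List (String × List String) => (PySem.Dict.mk p.2).getD "out_links" []) := by
    rw [PySem.Set.ofList_eq_foldl]; rfl
  rw [hofl]
  rw [pvFoldlFlatMap (g := fun p : String × List (String × List String) => (PySem.Dict.mk p.2).getD "out_links" [])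
        (f := fun (d : PySem.Dict String Int) t =>
          if PySem.Set.contains
              (PySem.Set.diff
                (PySem.Set.ofList (nodes.flatMap fun p => (PySem.Dict.mk p.2).getD "out_links" []))
                (PySem.Set.ofList (nodes.map (fun p => p.1)))) t
            then d.modify t 0 (· + 1) else d)]
  congr 1
  apply PySem.List.foldl_congr_mem
  intro d t ht
  rw [pvGhostContains _ _ _ ht]
  by_cases hk : t ∈ nodes.map (fun p => p.1) <;> simp [hk]
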